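-- pv_equiv track=rewrite | github.com/Duriann88/Vigen-re-Cipher | Vigenère Cipher.py | generate_keyword
-- ===== SOURCE A (Python) =====
-- def generate_keyword(text, keyword):
--     keyword = list(keyword)
--     if len(text) == len(keyword):
--         return keyword
--     else:
--         for i in range(len(text) - len(keyword)):
--             keyword.append(keyword[i % len(keyword)])
--     return "".join(keyword)
-- ===== SOURCE B (Python) =====
-- def generate_keyword(text, keyword):
--     if len(text) <= len(keyword):
--         return keyword
--     reps = len(text) // len(keyword) + 1
--     return (keyword * reps)[:len(text)]
-- ===== Notes on version B (the rewrite author's own statement) =====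
-- stated objective: simpler
-- what changed: Replaces A's element-by-element append loop indexing the growing list modulo its current length with a closed-form tiling: replicate the keyword ceil(len(text)/len(keyword)) times and slice to len(text).
-- outside the precondition, e.g. on generate_keyword('ab', 'cd'): A returns ['c', 'd'], B returns 'cd'
import Mathlib
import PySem

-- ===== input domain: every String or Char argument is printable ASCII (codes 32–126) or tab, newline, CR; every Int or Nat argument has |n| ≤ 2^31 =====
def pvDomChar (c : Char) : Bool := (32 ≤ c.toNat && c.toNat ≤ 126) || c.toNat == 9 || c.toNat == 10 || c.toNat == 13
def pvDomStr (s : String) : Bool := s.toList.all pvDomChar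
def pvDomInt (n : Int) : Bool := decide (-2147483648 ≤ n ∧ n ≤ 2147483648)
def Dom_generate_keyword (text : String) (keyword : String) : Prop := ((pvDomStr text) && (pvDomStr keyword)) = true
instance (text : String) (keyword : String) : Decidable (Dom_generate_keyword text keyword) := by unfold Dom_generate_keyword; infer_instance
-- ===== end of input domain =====

-- ===== PORT A =====
-- B replaces A's append loop (indexing the growing list modulo its current length) by
-- closed-form tiling: replicate the keyword and slice; objective: simpler.
def generate_keyword (text : String) (keyword : String) : String :=
  let kw := keyword.toList
  if text.toList.length = kw.length then
    -- Python returns the LIST here (not a str); excluded by Pre_ (see below)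
    String.ofList kw
  else
    String.ofList ((PySem.List.pyRange 0 ((text.toList.length : Int) - (kw.length : Int)) 1).foldl
      (fun s i => s ++ [PySem.List.pyGetD s (PySem.Int.mod i (s.length : Int)) ' ']) kw)
      -- pyGetD: under Pre_ (keyword nonempty) the index is always in range, as in the Python

-- ===== PORT B =====
def generate_keyword_alt (text : String) (keyword : String) : String :=
  let L := text.toList.length
  let k := keyword.toList.length
  if L ≤ k then keyword
  else String.ofList ((List.replicate (L / k + 1) keyword.toList).flatten.take L)

-- ===== PRECONDITION & SPEC =====
-- Pre_ excludes (a) equal-length inputs, where A returns list(keyword) — a list, not a str —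
-- and (b) an empty keyword with nonempty text, where A (and B) raise ZeroDivisionError.
def Pre_generate_keyword (text : String) (keyword : String) : Prop :=
  text.toList.length ≠ keyword.toList.length ∧ keyword.toList ≠ []
instance (text : String) (keyword : String) : Decidable (Pre_generate_keyword text keyword) := by
  unfold Pre_generate_keyword; infer_instance
def pvWitness_generate_keyword : String × String := ("abcde", "ab")
def Spec_generate_keyword (text : String) (keyword : String) (out : String) : Prop := out = generate_keyword_alt text keyword
instance (text : String) (keyword : String) (out : String) : Decidable (Spec_generate_keyword text keyword out) := by unfold Spec_generate_keyword; infer_instance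

-- ===== CLAIM (what is proved, stated in full; the proofs are below) =====
def Claim_equal_generate_keyword : Prop := ∀ (text : String) (keyword : String), Dom_generate_keyword text keyword → Pre_generate_keyword text keyword → Spec_generate_keyword text keyword (generate_keyword text keyword)

-- ===== LEMMAS AND PROOFS =====

-- the cyclic extension both programs compute, element by element
def pvCyc (kw : List Char) (j : Nat) : Char := kw.getD (j % kw.length) ' '

lemma pvCyc_base (kw : List Char) : kw = (List.range kw.length).map (pvCyc kw) := by
  apply List.ext_getElem
  · simp
  · intro j h1 h2
    simp [pvCyc, Nat.mod_eq_of_lt (by simpa using h2), List.getElem?_eq_getElem h1]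

-- A's loop invariant: after n iterations the list is the first (K+n) characters of the tiling
lemma pvLoopA (kw : List Char) (hk : kw ≠ []) (n : Nat) :
    (List.range n).foldl
      (fun s (j : Nat) => s ++ [PySem.List.pyGetD s (PySem.Int.mod (j : Int) (s.length : Int)) ' ']) kw
    = (List.range (kw.length + n)).map (pvCyc kw) := by
  induction n with
  | zero => simpa using pvCyc_base kw
  | succ n ih =>
      rw [List.range_succ, List.foldl_append, ih]
      have hlen : ((List.range (kw.length + n)).map (pvCyc kw)).length = kw.length + n := by simp
      have hlt : n < kw.length + n := by
        have : 0 < kw.length := List.length_pos_iff.mpr hk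
        omega
      have hmod : PySem.Int.mod (n : Int) ((kw.length + n : Nat) : Int) = ((n : Nat) : Int) := by
        rw [PySem.Int.mod_natCast]
        simp [Nat.mod_eq_of_lt hlt]
      simp only [List.foldl_cons, List.foldl_nil, hlen]
      rw [show ((kw.length + n : Nat) : Int) = (((kw.length + n : Nat) : Nat) : Int) by norm_cast]
      rw [hmod, PySem.List.pyGetD_natCast]
      have hgd : ((List.range (kw.length + n)).map (pvCyc kw)).getD n ' ' = pvCyc kw n := by
        rw [List.getD_eq_getElem?_getD]
        simp [hlt]
      rw [hgd]
      have : pvCyc kw n = pvCyc kw (kw.length + n) := by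
        simp [pvCyc, Nat.add_mod_left]
      rw [this, Nat.add_succ, List.range_succ, List.map_append, List.map_cons, List.map_nil]

-- B's tiling, element by element
lemma pvTile (kw : List Char) (m : Nat) :
    (List.replicate m kw).flatten = (List.range (m * kw.length)).map (pvCyc kw) := by
  induction m with
  | zero => simp
  | succ m ih =>
      rw [List.replicate_succ, List.flatten_cons, ih]
      have : (m + 1) * kw.length = kw.length + m * kw.length := by ring
      rw [this, List.range_add, List.map_append]
      congr 1
      · exact pvCyc_base kw
      · rw [List.map_map]
        apply List.map_congr_left
        intro j _
        simp [pvCyc, Nat.add_mod_left]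

lemma pvTake_map_range {α : Type} (f : Nat → α) (L n : Nat) (h : L ≤ n) :
    ((List.range n).map f).take L = (List.range L).map f := by
  rw [← List.map_take, List.take_range, Nat.min_eq_left h]

-- ===== VERDICT (by name: the statement is the Claim_ definition above) =====
theorem generate_keyword_spec : Claim_equal_generate_keyword := by
  intro text keyword _ hpre
  obtain ⟨hne, hkw⟩ := hpre
  unfold Spec_generate_keyword generate_keyword generate_keyword_alt
  simp only [if_neg hne]
  set kw := keyword.toList with hkwdef
  set L := text.toList.length with hL
  set K := kw.length with hK
  have hKpos : 0 < K := List.length_pos_iff.mpr hkw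
  by_cases hle : L ≤ K
  · -- text strictly shorter: the loop body is empty, both return the keyword
    have hlt : L < K := lt_of_le_of_ne hle hne
    have hnil : PySem.List.pyRange 0 ((L : Int) - (K : Int)) 1 = [] :=
      PySem.List.pyRange_one_eq_nil (by omega)
    rw [if_pos hle, hnil]
    simp [hkwdef]
  · -- extension case: both sides are the first L characters of the tiling
    rw [if_neg hle]
    have hKL : K < L := by omega
    have hfold : PySem.List.pyRange 0 ((L : Int) - (K : Int)) 1
        = (List.range (L - K)).map (fun j => ((j : Nat) : Int)) := by
      rw [PySem.List.pyRange_one]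
      have : (((L : Int) - (K : Int)) - 0).toNat = L - K := by omega
      rw [this]
      apply List.map_congr_left
      intro j _
      omega
    rw [hfold, List.foldl_map]
    rw [pvLoopA kw hkw (L - K)]
    have hLK : K + (L - K) = L := by omega
    rw [hLK, pvTile]
    congr 1
    have hmul : L ≤ (L / K + 1) * K := by
      have h1 := Nat.div_add_mod L K
      have h2 := Nat.mod_lt L hKpos
      have h3 : (L / K + 1) * K = K * (L / K) + K := by ring
      omega
    exact (pvTake_map_range (pvCyc kw) L ((L / K + 1) * K) hmul).symm
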